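-- pv_equiv track=rewrite | github.com/GongJae00/resPyre | optuna_runner.py | _group_methods_by_base
-- ===== SOURCE A (Python) =====
-- from typing import Any, Dict, Iterable, List, Optional, Sequence, Tuple
--
-- def _group_methods_by_base(methods: Sequence[str]) -> List[List[str]]:
--     groups: List[List[str]] = []
--     order: List[str] = []
--     by_base: Dict[str, List[str]] = {}
--     for name in methods:
--         base = name.split('__', 1)[0].lower()
--         if base not in by_base:
--             by_base[base] = []
--             order.append(base)
--         by_base[base].append(name)
--     for base in order:
--         groups.append(by_base.get(base, []))
--     return groups
-- ===== SOURCE B (Python) =====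
-- def _group_methods_by_base(methods):
--     keys = [name.split('__', 1)[0].lower() for name in methods]
--     seen = []
--     for k in keys:
--         if k not in seen:
--             seen.append(k)
--     return [[name for name, k in zip(methods, keys) if k == b] for b in seen]
-- ===== Notes on version B (the rewrite author's own statement) =====
-- stated objective: alternative
-- what changed: Replaces A's dict-of-buckets built incrementally plus a second assembly loop by precomputing all keys once, deduplicating them into an ordered list, and building each group with a filter comprehension over the zipped (name, key) pairs; no dictionary at all.
import Mathlib
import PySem

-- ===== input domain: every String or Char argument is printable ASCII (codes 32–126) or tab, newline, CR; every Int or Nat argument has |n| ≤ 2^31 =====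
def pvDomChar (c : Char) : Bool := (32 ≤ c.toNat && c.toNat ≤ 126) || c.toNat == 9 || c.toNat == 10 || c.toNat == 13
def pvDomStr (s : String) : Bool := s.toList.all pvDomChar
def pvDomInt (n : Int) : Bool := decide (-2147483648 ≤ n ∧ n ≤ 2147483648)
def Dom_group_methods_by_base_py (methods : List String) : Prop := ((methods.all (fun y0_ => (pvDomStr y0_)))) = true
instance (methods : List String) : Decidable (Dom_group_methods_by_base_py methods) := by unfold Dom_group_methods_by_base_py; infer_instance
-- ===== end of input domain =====

-- B replaces A's incrementally built dict of buckets (plus a second assembly loop) by a one-shot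
-- key list, an ordered dedup of it, and a filter per distinct key; alternative decomposition, no dict.

-- shared helper: name.split('__', 1)[0].lower()   (sep ≠ "" so splitMax? is some and nonempty;
-- [0] is PySem.List.pyGet? at 0, always in range here)
def pvKey (name : String) : String :=
  PySem.Str.lower ((PySem.List.pyGet? ((PySem.Str.splitMax? name "__" 1).getD []) 0).getD "")

-- ===== PORT A =====
def pvStepA (st : List String × PySem.Dict String (List String)) (name : String) :
    List String × PySem.Dict String (List String) :=
  let base := pvKey name
  let st' := if st.2.contains base then st else (st.1 ++ [base], st.2.insert base [])
  (st'.1, st'.2.modify base [] (fun l => l ++ [name]))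

def group_methods_by_base_py (methods : List String) : List (List String) :=
  let st := methods.foldl pvStepA ([], PySem.Dict.empty)
  st.1.foldl (fun groups base => groups ++ [st.2.getD base []]) []

-- ===== PORT B =====
def group_methods_by_base_py_alt (methods : List String) : List (List String) :=
  let keys := methods.map pvKey
  let seen := keys.foldl (fun s k => if s.contains k then s else s ++ [k]) ([] : List String)
  seen.map (fun b => ((methods.zip keys).filter (fun p => p.2 == b)).map Prod.fst)

-- ===== PRECONDITION & SPEC =====
def Spec_group_methods_by_base_py (methods : List String) (out : List (List String)) : Prop := out = group_methods_by_base_py_alt methods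
instance (methods : List String) (out : List (List String)) : Decidable (Spec_group_methods_by_base_py methods out) := by unfold Spec_group_methods_by_base_py; infer_instance

-- ===== CLAIM (what is proved, stated in full; the proofs are below) =====
def Claim_equal_group_methods_by_base_py : Prop := ∀ (methods : List String), Dom_group_methods_by_base_py methods → Spec_group_methods_by_base_py methods (group_methods_by_base_py methods)

-- ===== LEMMAS AND PROOFS =====

-- the second loop of A is a map
theorem pv_foldl_append_singleton {α β : Type} (l : List α) (f : α → β) (acc : List β) :
    l.foldl (fun g b => g ++ [f b]) acc = acc ++ l.map f := by
  induction l generalizing acc with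
  | nil => simp
  | cons x xs ih => simp [List.foldl, ih]

-- filtering the zipped (name, key) pairs is filtering the names by key
theorem pv_zip_filter (xs : List String) (b : String) :
    ((xs.zip (xs.map pvKey)).filter (fun p => p.2 == b)).map Prod.fst
      = xs.filter (fun n => pvKey n == b) := by
  induction xs with
  | nil => rfl
  | cons x xs ih =>
    by_cases h : pvKey x = b
    · simp [List.filter, h, ih]
    · have hne : (pvKey x == b) = false := by simp [h]
      simp [List.filter, hne, ih]

-- invariant of A's first loop: the order list is the ordered dedup of the keys, the dict's
-- membership agrees with the order list, and each bucket is the filter of the names by key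
theorem pv_loopA_spec (xs : List String) :
    (∀ b, ((xs.foldl pvStepA ([], PySem.Dict.empty)).2.contains b)
        = ((xs.foldl pvStepA ([], PySem.Dict.empty)).1.contains b))
    ∧ (xs.foldl pvStepA ([], PySem.Dict.empty)).1
        = (xs.map pvKey).foldl (fun s k => if s.contains k then s else s ++ [k]) []
    ∧ (∀ b, (xs.foldl pvStepA ([], PySem.Dict.empty)).2.getD b []
        = xs.filter (fun n => pvKey n == b)) := by
  induction xs using List.reverseRecOn with
  | nil => refine ⟨fun b => rfl, rfl, fun b => rfl⟩
  | append_singleton xs x ih =>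
    obtain ⟨hc, ho, hd⟩ := ih
    set st := xs.foldl pvStepA ([], PySem.Dict.empty) with hst
    have hfold : (xs ++ [x]).foldl pvStepA ([], PySem.Dict.empty) = pvStepA st x := by
      rw [List.foldl_append]; rfl
    have hofold : ((xs ++ [x]).map pvKey).foldl
        (fun s k => if s.contains k then s else s ++ [k]) []
        = (if st.1.contains (pvKey x) then st.1 else st.1 ++ [pvKey x]) := by
      rw [List.map_append, List.foldl_append, ← ho]; rfl
    rw [hfold, hofold]
    by_cases h : st.2.contains (pvKey x) = true
    · have h1 : st.1.contains (pvKey x) = true := by rw [← hc]; exact h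
      have h1' : pvKey x ∈ st.1 := by simpa using h1
      refine ⟨?_, ?_, ?_⟩
      · intro b
        simp [pvStepA, h, PySem.Dict.contains_modify, hc b]
        intro hb
        subst hb
        exact h1'
      · simp [pvStepA, h, h1']
      · intro b
        by_cases hb : b = pvKey x
        · subst hb
          simp [pvStepA, h, PySem.Dict.getD_modify, hd (pvKey x), List.filter_append,
            List.filter]
        · have hne : (pvKey x == b) = false := by simp [Ne.symm hb]
          simp [pvStepA, h, PySem.Dict.getD_modify, hb, hd b, List.filter_append,
            List.filter, hne]
    · have h1 : st.1.contains (pvKey x) = false := by rw [← hc]; simpa using h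
      have h1' : pvKey x ∉ st.1 := by simpa using h1
      simp only [Bool.not_eq_true] at h
      refine ⟨?_, ?_, ?_⟩
      · intro b
        simp [pvStepA, h, PySem.Dict.contains_modify, PySem.Dict.contains_insert,
          hc b, List.contains_append]
        by_cases hb : b = pvKey x <;> simp [hb, Bool.or_comm]
      · simp [pvStepA, h, h1']
      · intro b
        by_cases hb : b = pvKey x
        · subst hb
          have hnil : xs.filter (fun n => pvKey n == pvKey x) = [] := by
            rw [← hd (pvKey x)]
            exact PySem.Dict.getD_of_not_contains _ _ h
          simp [pvStepA, h, PySem.Dict.getD_modify, PySem.Dict.getD_insert,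
            List.filter_append, List.filter, hnil]
        · have hne : (pvKey x == b) = false := by simp [Ne.symm hb]
          simp [pvStepA, h, PySem.Dict.getD_modify, PySem.Dict.getD_insert,
            hd b, List.filter_append, List.filter, hb, hne]

-- ===== VERDICT (by name: the statement is the Claim_ definition above) =====
theorem group_methods_by_base_py_spec : Claim_equal_group_methods_by_base_py := by
  unfold Claim_equal_group_methods_by_base_py
  intro methods _
  unfold Spec_group_methods_by_base_py group_methods_by_base_py group_methods_by_base_py_alt
  obtain ⟨hc, ho, hd⟩ := pv_loopA_spec methods
  rw [pv_foldl_append_singleton, List.nil_append, ho]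
  refine List.map_congr_left ?_
  intro b _
  rw [hd b, pv_zip_filter]
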